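-- pv_equiv track=rewrite | github.com/Hadeelalmokhtar/DanahCopy5 | scripts/merge_falco.py | extract_falco_features
-- ===== SOURCE A (Python) =====
-- def extract_falco_features(alerts: list) -> dict:
--     """Extract 4 boolean features from Falco alert list."""
--     features = {
--         "falco_privilege_escalation":    "False",
--         "falco_write_binary_dir":        "False",
--         "falco_ptrace_detected":         "False",
--         "falco_package_install_runtime": "False",
--     }
--
--     for alert in alerts:
--         rule   = str(alert.get("rule",   "")).lower()
--         output = str(alert.get("output", "")).lower()
--         combined = rule + " " + output
--
--         if any(kw in combined for kw in [
--             "privilege", "setuid", "chmod 777", "escalat", "sudo", "cap_sys"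
--         ]):
--             features["falco_privilege_escalation"] = "True"
--
--         if any(kw in combined for kw in [
--             "write_binary", "binary dir", "/bin/", "/usr/bin/", "/sbin/",
--             "write below binary"
--         ]):
--             features["falco_write_binary_dir"] = "True"
--
--         if any(kw in combined for kw in [
--             "ptrace", "proc/mem", "process inject", "memory scraping"
--         ]):
--             features["falco_ptrace_detected"] = "True"
--
--         if any(kw in combined for kw in [
--             "package install", "pip install", "npm install",
--             "apt-get", "yum install", "apk add", "package manager"
--         ]):
--             features["falco_package_install_runtime"] = "True"
--
--     return features
-- ===== SOURCE B (Python) =====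
-- def extract_falco_features(alerts: list) -> dict:
--     """Join all alert texts into ONE newline-separated haystack, then test each
--     keyword exactly once against that single string.  Correct because no keyword
--     contains a newline, so no match can span the boundary between two alerts."""
--     haystack = "\n".join(
--         str(a.get("rule", "")).lower() + " " + str(a.get("output", "")).lower()
--         for a in alerts)
--     KEYWORDS = {
--         "falco_privilege_escalation": [
--             "privilege", "setuid", "chmod 777", "escalat", "sudo", "cap_sys"],
--         "falco_write_binary_dir": [
--             "write_binary", "binary dir", "/bin/", "/usr/bin/", "/sbin/",
--             "write below binary"],
--         "falco_ptrace_detected": [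
--             "ptrace", "proc/mem", "process inject", "memory scraping"],
--         "falco_package_install_runtime": [
--             "package install", "pip install", "npm install",
--             "apt-get", "yum install", "apk add", "package manager"],
--     }
--     return {name: str(any(kw in haystack for kw in kws))
--             for name, kws in KEYWORDS.items()}
-- ===== Notes on version B (the rewrite author's own statement) =====
-- stated objective: alternative
-- what changed: Instead of scanning every alert for every keyword with four per-alert flag-setting blocks, B joins all alert texts into one newline-separated haystack and performs exactly one substring test per keyword against that single string (sound because no keyword contains a newline).
import Mathlib
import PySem

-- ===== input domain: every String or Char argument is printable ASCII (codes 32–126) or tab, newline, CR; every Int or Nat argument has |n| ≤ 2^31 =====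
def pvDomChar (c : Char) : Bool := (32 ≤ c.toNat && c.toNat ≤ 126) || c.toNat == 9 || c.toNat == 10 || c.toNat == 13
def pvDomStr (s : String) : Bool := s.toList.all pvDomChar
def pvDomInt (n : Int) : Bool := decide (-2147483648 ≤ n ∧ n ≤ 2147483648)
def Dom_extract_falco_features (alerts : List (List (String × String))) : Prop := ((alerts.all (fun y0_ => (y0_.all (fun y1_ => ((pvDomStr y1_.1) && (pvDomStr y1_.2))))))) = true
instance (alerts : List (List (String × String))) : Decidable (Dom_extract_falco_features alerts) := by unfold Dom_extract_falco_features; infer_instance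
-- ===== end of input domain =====

-- B replaces A's per-alert flag-setting loop by joining all alert texts into one
-- newline-separated haystack and testing each keyword once against it (objective: alternative).

-- ===== PORT A =====
-- alert.get(k, "") : association-list dicts, lookup = first match (convention); str() is identity on str values
def pvGetStr (alert : List (String × String)) (k : String) : String :=
  ((alert.find? (fun p => p.1 == k)).map Prod.snd).getD ""

-- features[k] = v : Python dict assignment overwrites the value in place (k is always present here);
-- exact hand port of dict assignment for a dict whose key set contains k
def pvSetKey (d : List (String × String)) (k v : String) : List (String × String) :=
  d.map (fun p => if p.1 = k then (k, v) else p)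

def pvCombinedA (alert : List (String × String)) : String :=
  PySem.Str.lower (pvGetStr alert "rule") ++ " " ++ PySem.Str.lower (pvGetStr alert "output")

def pvStepA (features : List (String × String)) (alert : List (String × String)) :
    List (String × String) :=
  let combined := pvCombinedA alert
  let features := if ["privilege", "setuid", "chmod 777", "escalat", "sudo", "cap_sys"].any
      (fun kw => PySem.Str.isIn kw combined) then
    pvSetKey features "falco_privilege_escalation" "True" else features
  let features := if ["write_binary", "binary dir", "/bin/", "/usr/bin/", "/sbin/",
      "write below binary"].any (fun kw => PySem.Str.isIn kw combined) then
    pvSetKey features "falco_write_binary_dir" "True" else features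
  let features := if ["ptrace", "proc/mem", "process inject", "memory scraping"].any
      (fun kw => PySem.Str.isIn kw combined) then
    pvSetKey features "falco_ptrace_detected" "True" else features
  let features := if ["package install", "pip install", "npm install", "apt-get", "yum install",
      "apk add", "package manager"].any (fun kw => PySem.Str.isIn kw combined) then
    pvSetKey features "falco_package_install_runtime" "True" else features
  features

def extract_falco_features (alerts : List (List (String × String))) : List (String × String) :=
  alerts.foldl pvStepA
    [("falco_privilege_escalation", "False"), ("falco_write_binary_dir", "False"),
     ("falco_ptrace_detected", "False"), ("falco_package_install_runtime", "False")]

-- ===== PORT B =====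
def pvCombinedB (alert : List (String × String)) : String :=
  PySem.Str.lower (pvGetStr alert "rule") ++ " " ++ PySem.Str.lower (pvGetStr alert "output")

def pvTable : List (String × List String) :=
  [("falco_privilege_escalation",
      ["privilege", "setuid", "chmod 777", "escalat", "sudo", "cap_sys"]),
   ("falco_write_binary_dir",
      ["write_binary", "binary dir", "/bin/", "/usr/bin/", "/sbin/", "write below binary"]),
   ("falco_ptrace_detected",
      ["ptrace", "proc/mem", "process inject", "memory scraping"]),
   ("falco_package_install_runtime",
      ["package install", "pip install", "npm install", "apt-get", "yum install", "apk add",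
       "package manager"])]

def extract_falco_features_alt (alerts : List (List (String × String))) : List (String × String) :=
  let haystack := PySem.Str.join "\n" (alerts.map pvCombinedB)
  pvTable.map (fun nk =>
    (nk.1, if nk.2.any (fun kw => PySem.Str.isIn kw haystack) then "True" else "False"))

-- ===== PRECONDITION & SPEC =====
def Spec_extract_falco_features (alerts : List (List (String × String))) (out : List (String × String)) : Prop := out = extract_falco_features_alt alerts
instance (alerts : List (List (String × String))) (out : List (String × String)) : Decidable (Spec_extract_falco_features alerts out) := by unfold Spec_extract_falco_features; infer_instance

-- ===== CLAIM =====
def Claim_equal_extract_falco_features : Prop := ∀ (alerts : List (List (String × String))), Dom_extract_falco_features alerts → Spec_extract_falco_features alerts (extract_falco_features alerts)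

-- ===== LEMMAS AND PROOFS =====

-- the fold state always has the shape mk4 v1 v2 v3 v4
def mk4 (v1 v2 v3 v4 : String) : List (String × String) :=
  [("falco_privilege_escalation", v1), ("falco_write_binary_dir", v2),
   ("falco_ptrace_detected", v3), ("falco_package_install_runtime", v4)]

def hitK (kws : List String) (alert : List (String × String)) : Bool :=
  kws.any (fun kw => PySem.Str.isIn kw (pvCombinedA alert))

theorem stepA_mk4 (v1 v2 v3 v4 : String) (a : List (String × String)) :
    pvStepA (mk4 v1 v2 v3 v4) a =
      mk4 (if hitK ["privilege", "setuid", "chmod 777", "escalat", "sudo", "cap_sys"] a then "True" else v1)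
          (if hitK ["write_binary", "binary dir", "/bin/", "/usr/bin/", "/sbin/", "write below binary"] a then "True" else v2)
          (if hitK ["ptrace", "proc/mem", "process inject", "memory scraping"] a then "True" else v3)
          (if hitK ["package install", "pip install", "npm install", "apt-get", "yum install", "apk add", "package manager"] a then "True" else v4) := by
  simp only [pvStepA, hitK, mk4, pvSetKey, List.map_cons, List.map_nil]
  split_ifs <;> simp_all

theorem ite_true_absorb (h h' : Bool) (v : String) :
    (if h' then "True" else if h then "True" else v) = (if (h || h') then "True" else v) := by
  cases h <;> cases h' <;> rfl

theorem foldA_mk4 (alerts : List (List (String × String))) (v1 v2 v3 v4 : String) :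
    alerts.foldl pvStepA (mk4 v1 v2 v3 v4) =
      mk4 (if alerts.any (hitK ["privilege", "setuid", "chmod 777", "escalat", "sudo", "cap_sys"]) then "True" else v1)
          (if alerts.any (hitK ["write_binary", "binary dir", "/bin/", "/usr/bin/", "/sbin/", "write below binary"]) then "True" else v2)
          (if alerts.any (hitK ["ptrace", "proc/mem", "process inject", "memory scraping"]) then "True" else v3)
          (if alerts.any (hitK ["package install", "pip install", "npm install", "apt-get", "yum install", "apk add", "package manager"]) then "True" else v4) := by
  induction alerts generalizing v1 v2 v3 v4 with
  | nil => simp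
  | cons a rest ih =>
    simp only [List.foldl_cons, stepA_mk4, ih, List.any_cons, ite_true_absorb]
    rfl

-- a keyword not containing c that is a prefix of a ++ c :: b is a prefix of a
theorem prefix_split (kw a b : List Char) (c : Char) (hc : c ∉ kw)
    (h : kw <+: a ++ c :: b) : kw <+: a := by
  obtain ⟨t, ht⟩ := h
  by_cases hlen : kw.length ≤ a.length
  · have : kw = (a ++ c :: b).take kw.length := by
      rw [← ht, List.take_append_of_le_length le_rfl, List.take_length]
    rw [List.take_append_of_le_length hlen] at this
    exact this ▸ List.take_prefix _ _
  · exfalso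
    apply hc
    replace hlen := Nat.lt_of_not_le hlen
    have hlt : a.length < (kw ++ t).length := by
      rw [ht]; simp
    have h1 : (kw ++ t)[a.length]'hlt = kw[a.length]'hlen := List.getElem_append_left hlen
    have h2 : (kw ++ t)[a.length]'hlt = c := by
      simp only [ht]
      rw [List.getElem_append_right le_rfl]
      simp
    rw [h2] at h1
    exact h1 ▸ List.getElem_mem hlen

-- a keyword not containing c occurs in a ++ c :: b iff it occurs in a or in b
theorem infix_split (kw a b : List Char) (c : Char) (hc : c ∉ kw) :
    kw <:+: a ++ c :: b ↔ kw <:+: a ∨ kw <:+: b := by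
  constructor
  · intro h
    induction a with
    | nil =>
      rcases List.infix_cons_iff.mp h with hp | hi
      · cases kw with
        | nil => exact Or.inl List.nil_infix
        | cons k kw' =>
          obtain ⟨t, ht⟩ := hp
          exact absurd (by injection ht with h1 _; exact h1 ▸ List.mem_cons_self) hc
      · exact Or.inr hi
    | cons x a' ih =>
      rcases List.infix_cons_iff.mp h with hp | hi
      · exact Or.inl (prefix_split kw (x :: a') b c hc hp).isInfix
      · rcases ih hi with h1 | h2
        · exact Or.inl (List.infix_cons h1)
        · exact Or.inr h2
  · rintro (h | h)
    · exact h.trans (List.prefix_append a (c :: b)).isInfix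
    · exact h.trans ((List.suffix_cons c b).trans (List.suffix_append a (c :: b))).isInfix

-- a newline-free nonempty keyword occurs in the newline-join iff it occurs in some part
theorem chars_isIn_join (kw : List Char) (hne : kw ≠ []) (hc : '\n' ∉ kw)
    (ts : List (List Char)) :
    PySem.Chars.isIn kw (PySem.Chars.join ['\n'] ts) = ts.any (fun t => PySem.Chars.isIn kw t) := by
  induction ts with
  | nil =>
    rw [PySem.Chars.join_nil, List.any_nil, PySem.Chars.isIn_eq_false_iff]
    intro h
    exact hne (List.infix_nil.mp h)
  | cons x rest ih =>
    cases rest with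
    | nil => rw [PySem.Chars.join_singleton, List.any_cons, List.any_nil, Bool.or_false]
    | cons y ts' =>
      rw [PySem.Chars.join_cons_cons, List.any_cons]
      rw [Bool.eq_iff_iff, PySem.Chars.isIn_iff_infix]
      have : x ++ ['\n'] ++ PySem.Chars.join ['\n'] (y :: ts')
           = x ++ '\n' :: PySem.Chars.join ['\n'] (y :: ts') := by simp
      rw [this, infix_split kw _ _ '\n' hc]
      rw [← PySem.Chars.isIn_iff_infix, ← PySem.Chars.isIn_iff_infix, ih]
      simp

theorem str_isIn_join (kw : String) (hne : kw.toList ≠ []) (hc : '\n' ∉ kw.toList)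
    (ts : List String) :
    PySem.Str.isIn kw (PySem.Str.join "\n" ts) = ts.any (fun t => PySem.Str.isIn kw t) := by
  rw [PySem.Str.isIn_eq, PySem.Str.toList_join]
  have hsep : ("\n" : String).toList = ['\n'] := rfl
  rw [hsep, chars_isIn_join kw.toList hne hc, List.any_map]
  simp [PySem.Str.isIn_eq, Function.comp_def]

theorem any_congr_mem {α : Type} (l : List α) (p q : α → Bool)
    (h : ∀ x ∈ l, p x = q x) : l.any p = l.any q := by
  induction l with
  | nil => rfl
  | cons x rest ih =>
    rw [List.any_cons, List.any_cons, h x List.mem_cons_self,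
        ih (fun y hy => h y (List.mem_cons_of_mem x hy))]

theorem any_swap {α β : Type} (l : List α) (m : List β) (p : α → β → Bool) :
    (l.any fun x => m.any fun y => p x y) = (m.any fun y => l.any fun x => p x y) := by
  rw [Bool.eq_iff_iff]
  simp only [List.any_eq_true]
  constructor <;> rintro ⟨x, hx, y, hy, h⟩ <;> exact ⟨y, hy, x, hx, h⟩

-- one feature's flag, computed on the joined haystack, equals A's per-alert any
theorem feature_eq (kws : List String)
    (hkws : ∀ kw ∈ kws, kw.toList ≠ [] ∧ '\n' ∉ kw.toList)
    (alerts : List (List (String × String))) :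
    (kws.any fun kw => PySem.Str.isIn kw (PySem.Str.join "\n" (alerts.map pvCombinedB)))
      = alerts.any (hitK kws) := by
  have h1 : (kws.any fun kw => PySem.Str.isIn kw (PySem.Str.join "\n" (alerts.map pvCombinedB)))
      = kws.any fun kw => (alerts.map pvCombinedB).any (fun t => PySem.Str.isIn kw t) := by
    exact any_congr_mem kws _ _ (fun kw hkw => str_isIn_join kw (hkws kw hkw).1 (hkws kw hkw).2 _)
  rw [h1, any_swap]
  unfold hitK
  rw [List.any_map]
  rfl

theorem alt_eq_mk4 (alerts : List (List (String × String))) :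
    extract_falco_features_alt alerts =
      mk4 (if alerts.any (hitK ["privilege", "setuid", "chmod 777", "escalat", "sudo", "cap_sys"]) then "True" else "False")
          (if alerts.any (hitK ["write_binary", "binary dir", "/bin/", "/usr/bin/", "/sbin/", "write below binary"]) then "True" else "False")
          (if alerts.any (hitK ["ptrace", "proc/mem", "process inject", "memory scraping"]) then "True" else "False")
          (if alerts.any (hitK ["package install", "pip install", "npm install", "apt-get", "yum install", "apk add", "package manager"]) then "True" else "False") := by
  simp only [extract_falco_features_alt, pvTable, mk4, List.map_cons, List.map_nil]
  rw [feature_eq _ (by decide) alerts, feature_eq _ (by decide) alerts,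
      feature_eq _ (by decide) alerts, feature_eq _ (by decide) alerts]

-- ===== VERDICT =====
theorem extract_falco_features_spec : Claim_equal_extract_falco_features := by
  intro alerts _
  show extract_falco_features alerts = extract_falco_features_alt alerts
  rw [alt_eq_mk4]
  exact foldA_mk4 alerts "False" "False" "False" "False"
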